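-- pv_equiv track=rewrite | github.com/Pooky112/Baekjoon | 백준/Gold/20055. 컨베이어 벨트 위의 로봇/컨베이어 벨트 위의 로봇.py | conveyor_belt_robot
-- ===== SOURCE A (Python) =====
-- def conveyor_belt_robot(N, K, A):
--     step = 0
--     robot = [False] * N
--
--     while True:
--         step += 1
--
--         A = [A[-1]] + A[:-1]
--         robot = [False] + robot[:-1]
--
--         if robot[-1]:
--             robot[-1] = False
--
--         for i in range(N-2, -1, -1):
--            if robot[i] and not robot[i+1] and A[i+1] > 0:
--                robot[i] = False
--                robot[i+1] = True
--                A[i+1] -= 1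
--
--         if robot[-1]:
--             robot[-1] = False
--
--         if A[0]>0:
--             robot[0] = True
--             A[0] -= 1
--
--         if A.count(0) >= K:
--             return step
-- ===== SOURCE B (Python) =====
-- def conveyor_belt_robot(N, K, A):
--     # Sparse simulation: robots are a strictly-decreasing list of belt
--     # positions (only occupied cells are visited), durability sits in a fixed
--     # array addressed through a rotating head offset, and a running zero
--     # counter replaces the per-step A.count(0) scan.
--     M = len(A)
--     dur = list(A)
--     zeros = dur.count(0)
--     head = 0
--     robots = []        # belt positions of the robots, front-most first
--     step = 0
--     while True:
--         step += 1
--         head = (head - 1) % M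
--         moved = []
--         prev = N       # final position of the robot handled just before
--         for p in robots:
--             q = p + 1                  # the belt rotation carried it forward
--             if q >= N - 1:
--                 continue               # it reached the end: taken off
--             j = (head + q + 1) % M
--             if q + 1 != prev and dur[j] > 0:
--                 q += 1
--                 dur[j] -= 1
--                 if dur[j] == 0:
--                     zeros += 1
--             prev = q
--             if q < N - 1:
--                 moved.append(q)        # a robot stepping onto the end is taken off
--         if dur[head] > 0:              # the entry cell is always vacant here
--             dur[head] -= 1
--             if dur[head] == 0:
--                 zeros += 1
--             moved.append(0)
--         robots = moved
--         if zeros >= K: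
--             return step
-- ===== Notes on version B (the rewrite author's own statement) =====
-- stated objective: alternative
-- what changed: B replaces A's dense per-cell simulation (rebuilding the belt and robot lists each step, sweeping all N-1 cells, and rescanning A.count(0)) by a sparse one: the robots are kept as a strictly-decreasing list of belt positions that is the only thing the inner loop walks, durability sits in a fixed array addressed through a rotating head offset, and a running zero counter replaces the count scan.
-- outside the precondition, e.g. on conveyor_belt_robot(5, 2, [1, 0, 4]): A returns 2, B returns 2; on conveyor_belt_robot(3, 1, [5, 5]): A raises IndexError, B returns 5
import Mathlib
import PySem

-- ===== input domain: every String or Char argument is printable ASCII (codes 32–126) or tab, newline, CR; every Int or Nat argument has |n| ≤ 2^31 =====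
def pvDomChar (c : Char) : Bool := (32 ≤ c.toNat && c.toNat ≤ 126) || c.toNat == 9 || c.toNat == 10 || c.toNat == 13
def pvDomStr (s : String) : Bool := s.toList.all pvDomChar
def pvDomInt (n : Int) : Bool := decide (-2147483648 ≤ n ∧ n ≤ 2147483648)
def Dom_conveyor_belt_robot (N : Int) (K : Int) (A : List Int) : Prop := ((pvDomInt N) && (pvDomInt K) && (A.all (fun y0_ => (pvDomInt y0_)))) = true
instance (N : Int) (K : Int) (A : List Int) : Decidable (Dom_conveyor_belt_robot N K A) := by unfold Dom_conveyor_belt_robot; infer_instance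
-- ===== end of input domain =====

-- B replaces A's dense per-cell simulation (rebuilt belt/robot lists, an O(N)
-- cell sweep and an A.count(0) rescan every step) by a sparse one: the robots
-- are a strictly-decreasing list of positions that is the only thing the inner
-- loop walks, the durability array is fixed and addressed through a rotating
-- head offset, and a running zero counter replaces the count scan
-- (objective: alternative).  Both Python loops are `while True`; the ports
-- drive them with one shared fuel bound.

-- ===== PORT A =====

def pvFuel (A : List Int) : Nat := (A.length + 1) * ((A.map Int.natAbs).sum + 2) + 2

-- body of A's inner `for i in range(N-2, -1, -1)` loop
def pvAInner (s : List Int × List Bool) (i : Int) : List Int × List Bool :=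
  if PySem.List.pyGetD s.2 i false && !(PySem.List.pyGetD s.2 (i+1) false)
      && decide (0 < PySem.List.pyGetD s.1 (i+1) 0) then
    (PySem.List.pySetD s.1 (i+1) (PySem.List.pyGetD s.1 (i+1) 0 - 1),
     PySem.List.pySetD (PySem.List.pySetD s.2 i false) (i+1) true)
  else s

-- one iteration of A's while-loop body (before the A.count(0) >= K test)
def pvAStep (N : Int) (A : List Int) (robot : List Bool) : List Int × List Bool :=
  let A := PySem.List.pyGetD A (-1) 0 :: PySem.List.slice A none (some (-1))
  let robot := false :: PySem.List.slice robot none (some (-1))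
  let robot := if PySem.List.pyGetD robot (-1) false then PySem.List.pySetD robot (-1) false else robot
  let s := (PySem.List.pyRange (N-2) (-1) (-1)).foldl pvAInner (A, robot)
  let A := s.1
  let robot := if PySem.List.pyGetD s.2 (-1) false then PySem.List.pySetD s.2 (-1) false else s.2
  if 0 < PySem.List.pyGetD A 0 0 then
    (PySem.List.pySetD A 0 (PySem.List.pyGetD A 0 0 - 1), PySem.List.pySetD robot 0 true)
  else (A, robot)

def pvALoop (N K : Int) : Nat → Int → List Int → List Bool → Int
  | 0, _, _, _ => 0
  | fuel+1, step, A, robot =>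
    let s := pvAStep N A robot
    if K ≤ (s.1.count 0 : Int) then step + 1 else pvALoop N K fuel (step + 1) s.1 s.2

def conveyor_belt_robot (N : Int) (K : Int) (A : List Int) : Int :=
  pvALoop N K (pvFuel A) 0 A (List.replicate N.toNat false)

-- ===== PORT B =====
-- body of B's for-loop AFTER the `if q >= N - 1: continue` guard; the state is
-- (moved, prev, dur, zeros) and q = p + 1 is the robot's position after rotation
def pvBCore (N M head : Int) (s : List Int × Int × List Int × Int) (q : Int) :
    List Int × Int × List Int × Int :=
  let j := PySem.Int.mod (head + q + 1) M
  if q + 1 ≠ s.2.1 ∧ 0 < PySem.List.pyGetD s.2.2.1 j 0 then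
    let dur' := PySem.List.pySetD s.2.2.1 j (PySem.List.pyGetD s.2.2.1 j 0 - 1)
    let z' := if PySem.List.pyGetD dur' j 0 = 0 then s.2.2.2 + 1 else s.2.2.2
    (if q + 1 < N - 1 then s.1 ++ [q + 1] else s.1, q + 1, dur', z')
  else
    (if q < N - 1 then s.1 ++ [q] else s.1, q, s.2.2.1, s.2.2.2)

-- full body of B's `for p in robots` loop
def pvBInner (N M head : Int) (s : List Int × Int × List Int × Int) (p : Int) :
    List Int × Int × List Int × Int :=
  if N - 1 ≤ p + 1 then s else pvBCore N M head s (p + 1)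

-- one iteration of B's while-loop body; returns (head, robots, dur, zeros)
def pvBStep (N M head : Int) (robots dur : List Int) (z : Int) :
    Int × List Int × List Int × Int :=
  let head := PySem.Int.mod (head - 1) M
  let s := robots.foldl (pvBInner N M head) (([] : List Int), N, dur, z)
  if 0 < PySem.List.pyGetD s.2.2.1 head 0 then
    let dur' := PySem.List.pySetD s.2.2.1 head (PySem.List.pyGetD s.2.2.1 head 0 - 1)
    let z' := if PySem.List.pyGetD dur' head 0 = 0 then s.2.2.2 + 1 else s.2.2.2
    (head, s.1 ++ [0], dur', z')
  else (head, s.1, s.2.2.1, s.2.2.2)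

def pvBLoop (N K M : Int) : Nat → Int → Int → List Int → List Int → Int → Int
  | 0, _, _, _, _, _ => 0
  | fuel+1, step, head, robots, dur, z =>
    let s := pvBStep N M head robots dur z
    if K ≤ s.2.2.2 then step + 1 else pvBLoop N K M fuel (step + 1) s.1 s.2.1 s.2.2.1 s.2.2.2

def conveyor_belt_robot_alt (N : Int) (K : Int) (A : List Int) : Int :=
  pvBLoop N K (A.length : Int) (pvFuel A) 0 0 [] A (A.count 0 : Int)

-- ===== PRECONDITION & SPEC =====
-- Pre_ excludes the empty belt (A raises IndexError) and the inputs where the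
-- simulation is not guaranteed to reach K zero-durability cells with N inside
-- the belt: there A diverges, raises IndexError (robots indexed past the end
-- of A when N > len(A)), or — when it happens to return — its value rests on
-- the accidental behaviour of a robot list longer than the belt itself.
def Pre_conveyor_belt_robot (N : Int) (K : Int) (A : List Int) : Prop :=
  A ≠ [] ∧ (K ≤ (A.count 0 : Int) ∨
    (1 ≤ N ∧ N ≤ (A.length : Int) ∧
      K ≤ (A.count 0 : Int) + (A.countP (fun x => decide (0 < x)) : Int)))
instance (N : Int) (K : Int) (A : List Int) : Decidable (Pre_conveyor_belt_robot N K A) := by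
  unfold Pre_conveyor_belt_robot; infer_instance
def pvWitness_conveyor_belt_robot : Int × Int × List Int := (2, 3, [3, 0, 1, 2])
def Spec_conveyor_belt_robot (N : Int) (K : Int) (A : List Int) (out : Int) : Prop := out = conveyor_belt_robot_alt N K A
instance (N : Int) (K : Int) (A : List Int) (out : Int) : Decidable (Spec_conveyor_belt_robot N K A out) := by unfold Spec_conveyor_belt_robot; infer_instance

-- ===== CLAIM (what is proved, stated in full; the proofs are below) =====
def Claim_equal_conveyor_belt_robot : Prop := ∀ (N : Int) (K : Int) (A : List Int), Dom_conveyor_belt_robot N K A → Pre_conveyor_belt_robot N K A → Spec_conveyor_belt_robot N K A (conveyor_belt_robot N K A)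

-- ===== LEMMAS AND PROOFS =====

-- `pvR hd l` is l rotated left by hd: belt position p holds cell (hd+p) % M
def pvR {α : Type} (hd : Nat) (l : List α) : List α := l.drop hd ++ l.take hd

-- `occOf n S` is the dense occupancy list of length n whose trues are exactly S
def occOf (n : Nat) (S : List Int) : List Bool :=
  (List.range n).map (fun i : Nat => decide ((i : Int) ∈ S))

-- `df i` is the descending index list [i-1, …, 1, 0] that A's inner loop walks
def df : Nat → List Int
  | 0 => []
  | i+1 => (i : Int) :: df i

theorem length_pvR {α : Type} (hd : Nat) (l : List α) (h : hd ≤ l.length) :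
    (pvR hd l).length = l.length := by simp [pvR]; omega

theorem idx_inj (M hd p q : Nat) (hp : p < M) (hq : q < M) :
    (hd + p) % M = (hd + q) % M ↔ p = q := by
  constructor
  · intro h
    exact (Nat.ModEq.add_left_cancel' hd h).eq_of_lt_of_lt hp hq
  · rintro rfl; rfl

theorem getElem_pvR {α : Type} (hd : Nat) (l : List α) (p : Nat)
    (hhd : hd < l.length) (hp : p < l.length)
    (h1 : p < (pvR hd l).length) (h2 : (hd + p) % l.length < l.length) :
    (pvR hd l)[p] = l[(hd + p) % l.length] := by
  unfold pvR
  by_cases hc : p < l.length - hd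
  · rw [List.getElem_append_left (by simp; omega)]
    rw [List.getElem_drop]
    congr 1
    rw [Nat.mod_eq_of_lt (by omega)]
  · rw [List.getElem_append_right (by simp; omega)]
    rw [List.getElem_take]
    have hm : (hd + p) % l.length = p - (List.drop hd l).length := by
      rw [Nat.mod_eq_sub_mod (by omega), Nat.mod_eq_of_lt (by omega)]
      simp; omega
    congr 1
    exact hm.symm

theorem pvR_set {α : Type} (hd p : Nat) (l : List α) (v : α)
    (hhd : hd < l.length) (hp : p < l.length) :
    pvR hd (l.set ((hd + p) % l.length) v) = (pvR hd l).set p v := by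
  have hm : (hd + p) % l.length < l.length := Nat.mod_lt _ (by omega)
  apply List.ext_getElem
  · simp [pvR]
  · intro q hq1 hq2
    have hlq : q < l.length := by
      have := length_pvR hd (l.set ((hd + p) % l.length) v) (by simp; omega)
      simp at this; omega
    rw [getElem_pvR hd _ q (by simp; omega) (by simp; omega)
        (by simpa using hq1) (by simp; exact Nat.mod_lt _ (by omega))]
    simp only [List.length_set]
    rw [List.getElem_set, List.getElem_set]
    by_cases he : p = q
    · subst he; simp
    · have hne : ¬((hd + p) % l.length = (hd + q) % l.length) :=
        fun hc => he ((idx_inj l.length hd p q hp hlq).1 hc)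
      rw [if_neg hne, if_neg he]
      exact (getElem_pvR hd l q hhd hlq (by simpa using hq2)
        (by exact Nat.mod_lt _ (by omega))).symm

theorem read_belt (hd k : Nat) (dur : List Int) (hk : k < dur.length) (hhd : hd < dur.length) :
    (pvR hd dur).getD k 0 = dur.getD ((hd + k) % dur.length) 0 := by
  have hM : 0 < dur.length := by omega
  have hlenR : (pvR hd dur).length = dur.length := length_pvR hd dur (by omega)
  rw [List.getD_eq_getElem _ _ (by rw [hlenR]; omega),
    getElem_pvR hd dur k hhd (by omega) (by rw [hlenR]; omega) (Nat.mod_lt _ hM),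
    List.getD_eq_getElem _ _ (Nat.mod_lt _ hM)]

theorem count_pvR (hd : Nat) (l : List Int) (a : Int) :
    (pvR hd l).count a = l.count a := by
  unfold pvR
  rw [List.count_append, Nat.add_comm, ← List.count_append, List.take_append_drop]

theorem shift_idx (M hd p : Nat) (hM : 0 < M) :
    ((hd + (M - 1)) % M + (p + 1)) % M = (hd + p) % M := by
  rw [Nat.mod_add_mod]
  have h : hd + (M - 1) + (p + 1) = hd + p + M := by omega
  rw [h, Nat.add_mod_right]

theorem rot_cons {α : Type} [Inhabited α] (hd : Nat) (l : List α) (d : α) (hl : l ≠ [])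
    (hhd : hd < l.length) :
    (PySem.List.pyGetD (pvR hd l) (-1) d :: PySem.List.slice (pvR hd l) none (some (-1)))
      = pvR ((hd + (l.length - 1)) % l.length) l := by
  have hM : 0 < l.length := List.length_pos_iff.mpr hl
  have hlenR : (pvR hd l).length = l.length := length_pvR hd l (by omega)
  have hhd' : (hd + (l.length - 1)) % l.length < l.length := Nat.mod_lt _ hM
  have hlenR' : (pvR ((hd + (l.length - 1)) % l.length) l).length = l.length :=
    length_pvR _ l (by omega)
  have hR : pvR hd l ≠ [] := by
    intro hcon; rw [hcon] at hlenR; simp at hlenR; omega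
  rw [PySem.List.pyGetD_neg_one _ d hR, PySem.List.slice_to_neg_one]
  apply List.ext_getElem
  · simp only [List.length_cons, List.length_dropLast, hlenR, hlenR']; omega
  · intro p h1 h2
    cases p with
    | zero =>
      rw [List.getElem_cons_zero, List.getLast_eq_getElem]
      simp only [hlenR]
      rw [getElem_pvR hd l (l.length - 1) hhd (by omega) (by rw [hlenR]; omega) (Nat.mod_lt _ hM)]
      rw [getElem_pvR _ l 0 hhd' (by omega) (by rw [hlenR']; omega) (Nat.mod_lt _ hM)]
      congr 1
      rw [Nat.add_zero, Nat.mod_eq_of_lt hhd']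
    | succ p =>
      have hp1 : p + 1 < l.length := by rw [hlenR'] at h2; exact h2
      rw [List.getElem_cons_succ, List.getElem_dropLast]
      rw [getElem_pvR hd l p hhd (by omega) (by rw [hlenR]; omega) (Nat.mod_lt _ hM)]
      rw [getElem_pvR _ l (p+1) hhd' (by omega) (by rw [hlenR']; omega) (Nat.mod_lt _ hM)]
      congr 1
      exact (shift_idx l.length hd p hM).symm

theorem countZero_set_int (l : List Int) (j : Nat) (x : Int) (hj : j < l.length) :
    ((l.set j x).count 0 : Int) =
      (l.count 0 : Int) + (if x = 0 then 1 else 0) - (if l[j] = 0 then 1 else 0) := by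
  induction l generalizing j with
  | nil => simp at hj
  | cons a tl ih =>
    cases j with
    | zero =>
      simp [List.count_cons]
      split_ifs <;> simp_all
    | succ n =>
      have hn : n < tl.length := by simpa using hj
      have H := ih n hn
      simp only [List.set_cons_succ, List.count_cons, List.getElem_cons_succ]
      split_ifs at H ⊢ <;> push_cast at H ⊢ <;> omega

theorem pymod_add_nat (h i M : Nat) :
    PySem.Int.mod ((h : Int) + (i : Int)) (M : Int) = (((h + i) % M : Nat) : Int) := by
  have : (h : Int) + (i : Int) = ((h + i : Nat) : Int) := by push_cast; ring
  rw [this, PySem.Int.mod_natCast]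

theorem pymod_sub_one (a M : Nat) (hM : 0 < M) :
    PySem.Int.mod ((a : Int) - 1) (M : Int) = (((a + (M - 1)) % M : Nat) : Int) := by
  have h1 : (a : Int) - 1 = ((a + (M-1) : Nat) : Int) - (M : Int) := by push_cast; omega
  rw [h1, PySem.Int.mod_eq_emod_of_pos (by exact_mod_cast hM), Int.sub_emod_right]
  rw [← PySem.Int.mod_eq_emod_of_pos (by exact_mod_cast hM), PySem.Int.mod_natCast]

theorem pyRange_down (N : Int) :
    PySem.List.pyRange (N-2) (-1) (-1) =
      (List.range (N-1).toNat).map (fun k : Nat => (N-2) - (k : Int)) := by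
  conv_lhs => simp only [PySem.List.pyRange]
  rw [if_neg (show ¬(-1:Int) = 0 by norm_num), if_neg (show ¬(0:Int) < -1 by norm_num)]
  by_cases h : (-1:Int) < N - 2
  · rw [if_pos h]
    have hc : ((N - 2 - -1 + - -1 - 1) / - -1).toNat = (N-1).toNat := by
      simp only [neg_neg, Int.ediv_one]; omega
    rw [hc]
    apply List.map_congr_left
    intro k _
    ring
  · rw [if_neg h]
    have h0 : (N-1).toNat = 0 := by omega
    rw [h0]
    simp

theorem range_map_df (m : Nat) :
    (List.range m).map (fun k : Nat => ((m : Int) - 1 - (k : Int))) = df m := by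
  induction m with
  | zero => simp [df]
  | succ m ih =>
    rw [List.range_succ_eq_map, List.map_cons, List.map_map]
    simp only [df]
    congr 1
    · push_cast; ring
    · rw [← ih]
      apply List.map_congr_left
      intro k _
      simp only [Function.comp_apply]
      push_cast; ring

theorem df_pyRange (N : Int) (hN : 1 ≤ N) :
    PySem.List.pyRange (N-2) (-1) (-1) = df (N-1).toNat := by
  rw [pyRange_down, ← range_map_df]
  apply List.map_congr_left
  intro k _
  have : (((N-1).toNat : Int)) = N - 1 := by omega
  rw [this]
  ring

-- ===== occOf lemmas =====

theorem length_occOf (n : Nat) (S : List Int) : (occOf n S).length = n := by simp [occOf]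

theorem getElem_occOf (n : Nat) (S : List Int) (j : Nat)
    (h : j < (occOf n S).length) : (occOf n S)[j] = decide ((j : Int) ∈ S) := by
  simp only [occOf, List.getElem_map, List.getElem_range]

theorem occOf_congr (n : Nat) (S T : List Int)
    (h : ∀ i : Nat, i < n → ((i : Int) ∈ S ↔ (i : Int) ∈ T)) : occOf n S = occOf n T := by
  apply List.ext_getElem
  · simp [length_occOf]
  · intro j h1 h2
    have hj : j < n := by simpa [length_occOf] using h1
    rw [getElem_occOf, getElem_occOf]
    exact decide_eq_decide.mpr (h j hj)

theorem occOf_nil (n : Nat) : occOf n [] = List.replicate n false := by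
  apply List.ext_getElem
  · simp [length_occOf]
  · intro j h1 h2
    have hj : j < n := by simpa [length_occOf] using h1
    rw [getElem_occOf]
    simp

theorem occOf_pyGetD (n : Nat) (S : List Int) (j : Nat) (hj : j < n) :
    PySem.List.pyGetD (occOf n S) (j : Int) false = decide ((j : Int) ∈ S) := by
  rw [PySem.List.pyGetD_natCast, List.getD_eq_getElem _ _ (by simp [length_occOf]; omega),
    getElem_occOf]

theorem occOf_set_true (n : Nat) (S : List Int) (j : Nat) (hj : j < n) :
    (occOf n S).set j true = occOf n ((j : Int) :: S) := by
  apply List.ext_getElem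
  · simp [length_occOf]
  · intro i h1 h2
    have hi : i < n := by simpa [length_occOf] using h2
    simp only [List.getElem_set, getElem_occOf]
    by_cases he : j = i
    · subst he; simp
    · have hne : ¬((i : Int) = (j : Int)) := by omega
      simp [he, List.mem_cons, hne]

theorem occOf_set_false (n : Nat) (S : List Int) (j : Nat) (hj : j < n) :
    (occOf n S).set j false = occOf n (S.filter (fun a => decide (a ≠ (j : Int)))) := by
  apply List.ext_getElem
  · simp [length_occOf]
  · intro i h1 h2
    have hi : i < n := by simpa [length_occOf] using h2
    simp only [List.getElem_set, getElem_occOf]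
    by_cases he : j = i
    · subst he
      simp [List.mem_filter]
    · have hne : ¬((i : Int) = (j : Int)) := by omega
      simp [he, List.mem_filter, hne]

theorem occOf_ne_nil (n : Nat) (hn : 0 < n) (S : List Int) : occOf n S ≠ [] := by
  intro h
  have := length_occOf n S
  rw [h] at this
  simp at this
  omega

theorem occOf_getLast (n : Nat) (hn : 0 < n) (S : List Int) (h : occOf n S ≠ []) :
    (occOf n S).getLast h = decide ((((n - 1 : Nat)) : Int) ∈ S) := by
  rw [List.getLast_eq_getElem]
  have hl := length_occOf n S
  rw [getElem_occOf]
  congr 2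
  omega

-- A's rotation of the robot list, in occOf form
theorem occOf_rot (n : Nat) (hn : 0 < n) (S : List Int) (hS : ∀ p ∈ S, 0 ≤ p) :
    false :: (occOf n S).dropLast = occOf n (S.map (· + 1)) := by
  apply List.ext_getElem
  · simp [length_occOf]
    omega
  · intro i h1 h2
    have hi : i < n := by simpa [length_occOf] using h2
    rw [getElem_occOf]
    cases i with
    | zero =>
      rw [List.getElem_cons_zero]
      have : ¬((0 : Int) ∈ S.map (· + 1)) := by
        simp only [List.mem_map, not_exists]
        intro p
        intro hc
        have := hS p hc.1
        omega
      simp [this]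
    | succ k =>
      rw [List.getElem_cons_succ, List.getElem_dropLast, getElem_occOf]
      have : ((k + 1 : Nat) : Int) ∈ S.map (· + 1) ↔ (k : Int) ∈ S := by
        simp only [List.mem_map]
        constructor
        · rintro ⟨p, hp, he⟩
          have : p = (k : Int) := by omega
          rwa [this] at hp
        · intro hk
          exact ⟨k, hk, by push_cast; ring⟩
      simp [this]

theorem pySetD_neg_one {α : Type} (l : List α) (v : α) (h : l ≠ []) :
    PySem.List.pySetD l (-1) v = l.set (l.length - 1) v := by
  have hl : 0 < l.length := List.length_pos_iff.mpr h
  simp [PySem.List.pySetD, PySem.List.pySet?, PySem.List.pyIdx?,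
    show -(l.length:Int) ≤ -1 by omega]

-- A's `if robot[-1]: robot[-1] = False` clear, in occOf form
theorem occOf_clear (n : Nat) (hn : 0 < n) (T : List Int) :
    (if PySem.List.pyGetD (occOf n T) (-1) false then PySem.List.pySetD (occOf n T) (-1) false
     else occOf n T)
      = occOf n (T.filter (fun a => decide (a < (n : Int) - 1))) := by
  have hne := occOf_ne_nil n hn T
  rw [PySem.List.pyGetD_neg_one _ false hne, occOf_getLast n hn T hne]
  have hc : ((n - 1 : Nat) : Int) = (n : Int) - 1 := by omega
  by_cases hmem : ((n - 1 : Nat) : Int) ∈ T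
  · rw [if_pos (by simpa using hmem), pySetD_neg_one _ _ hne, length_occOf,
      occOf_set_false n T (n-1) (by omega)]
    apply occOf_congr
    intro i hi
    simp only [List.mem_filter, decide_eq_true_eq]
    constructor
    · rintro ⟨hiT, hne2⟩
      exact ⟨hiT, by omega⟩
    · rintro ⟨hiT, hlt⟩
      exact ⟨hiT, by omega⟩
  · rw [if_neg (by simpa using hmem)]
    apply occOf_congr
    intro i hi
    simp only [List.mem_filter, decide_eq_true_eq]
    constructor
    · intro hiT
      refine ⟨hiT, ?_⟩
      rcases lt_or_ge (i : Int) ((n:Int) - 1) with h | h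
      · exact h
      · exfalso
        have hieq : (i : Int) = ((n - 1 : Nat) : Int) := by omega
        rw [hieq] at hiT
        exact hmem hiT
    · exact fun h => h.1

-- B's for-loop over robots equals the core fold over the shifted, filtered list
theorem bridge (N M head : Int) (R : List Int) :
    ∀ s, R.foldl (pvBInner N M head) s
      = ((R.map (· + 1)).filter (fun q => decide (q < N - 1))).foldl (pvBCore N M head) s := by
  induction R with
  | nil => intro s; rfl
  | cons p R ih =>
    intro s
    simp only [List.foldl_cons, List.map_cons, List.filter_cons]
    by_cases h : N - 1 ≤ p + 1
    · rw [pvBInner, if_pos h]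
      rw [if_neg (by simp; omega)]
      exact ih s
    · rw [pvBInner, if_neg h]
      rw [if_pos (by simp; omega)]
      simp only [List.foldl_cons]
      exact ih _

-- membership at the minimum of a strictly descending list
theorem mem_iff_getLast? (L : List Int) (hL : L.Pairwise (· > ·)) (x : Int)
    (hx : ∀ a ∈ L, x ≤ a) : x ∈ L ↔ L.getLast? = some x := by
  induction L with
  | nil => simp
  | cons a L ih =>
    rcases eq_or_ne L [] with rfl | hLne
    · simp [eq_comm]
    · have hpw := List.pairwise_cons.1 hL
      have hxa : x ≠ a := by
        obtain ⟨b, hb⟩ := List.exists_mem_of_ne_nil L hLne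
        have h1 := hpw.1 b hb
        have h2 := hx b (List.mem_cons_of_mem _ hb)
        omega
      obtain ⟨c, L', rfl⟩ := List.exists_cons_of_ne_nil hLne
      rw [List.getLast?_cons_cons, List.mem_cons]
      have hIH := ih hpw.2 (fun a ha => hx a (List.mem_cons_of_mem _ ha))
      constructor
      · rintro (rfl | hm)
        · exact absurd rfl hxa
        · exact hIH.1 hm
      · intro hg
        exact Or.inr (hIH.2 hg)

theorem mem_iff_getLastD (L : List Int) (hL : L.Pairwise (· > ·)) (x N : Int)
    (hx : ∀ a ∈ L, x ≤ a) (hxN : x ≠ N) : x ∈ L ↔ L.getLastD N = x := by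
  rw [List.getLastD_eq_getLast?, mem_iff_getLast? L hL x hx]
  cases hg : L.getLast? with
  | none => simp [Ne.symm hxN]
  | some l => simp [eq_comm]

-- The main scan lemma: A's dense sweep over df i equals B's fold over the robots
theorem scanAB (N : Int) (M n : Nat) (hM : 0 < M) (hn : (n : Int) = N) (hnM : n ≤ M)
    (hd : Nat) (hhd : hd < M) :
    ∀ (i : Nat), i ≤ n - 1 →
    ∀ (acc Q dur : List Int) (z : Int),
      dur.length = M →
      (acc ++ Q).Pairwise (· > ·) →
      (∀ a ∈ acc, 1 ≤ a ∧ (i : Int) ≤ a ∧ a ≤ (n : Int) - 1) →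
      (∀ q ∈ Q, 1 ≤ q ∧ q ≤ (i : Int) - 1) →
      z = (dur.count 0 : Int) →
      ∃ acc' : List Int,
        (df i).foldl pvAInner (pvR hd dur, occOf n (acc ++ Q))
          = (pvR hd (Q.foldl (pvBCore N (M : Int) (hd : Int))
              (acc.filter (fun a => decide (a < N - 1)), acc.getLastD N, dur, z)).2.2.1,
             occOf n acc')
        ∧ (Q.foldl (pvBCore N (M : Int) (hd : Int))
              (acc.filter (fun a => decide (a < N - 1)), acc.getLastD N, dur, z)).1
            = acc'.filter (fun a => decide (a < N - 1))
        ∧ (Q.foldl (pvBCore N (M : Int) (hd : Int))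
              (acc.filter (fun a => decide (a < N - 1)), acc.getLastD N, dur, z)).2.1
            = acc'.getLastD N
        ∧ acc'.Pairwise (· > ·)
        ∧ (∀ a ∈ acc', 1 ≤ a ∧ a ≤ (n : Int) - 1)
        ∧ (Q.foldl (pvBCore N (M : Int) (hd : Int))
              (acc.filter (fun a => decide (a < N - 1)), acc.getLastD N, dur, z)).2.2.1.length = M
        ∧ (Q.foldl (pvBCore N (M : Int) (hd : Int))
              (acc.filter (fun a => decide (a < N - 1)), acc.getLastD N, dur, z)).2.2.2
            = ((Q.foldl (pvBCore N (M : Int) (hd : Int))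
              (acc.filter (fun a => decide (a < N - 1)), acc.getLastD N, dur, z)).2.2.1.count 0 : Int) := by
  intro i
  induction i with
  | zero =>
    intro _ acc Q dur z hdl hpw hacc hQ hz
    have hQnil : Q = [] := by
      cases Q with
      | nil => rfl
      | cons q Q' => exact absurd (hQ q (by simp)) (by push_cast; omega)
    subst hQnil
    refine ⟨acc, by simp [df], rfl, rfl, by simpa using hpw,
      fun a ha => ⟨(hacc a ha).1, (hacc a ha).2.2⟩, hdl, hz⟩
  | succ i ih =>
    intro hi acc Q dur z hdl hpw hacc hQ hz
    have hin : i < n := by omega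
    have hi1n : i + 1 < n := by omega
    have hiacc : ((i : Int)) ∉ acc := by
      intro h
      have := (hacc _ h).2.1
      push_cast at this
      omega
    have hfold : df (i+1) = (↑i : Int) :: df i := rfl
    rw [hfold]
    simp only [List.foldl_cons]
    have hri : PySem.List.pyGetD (occOf n (acc ++ Q)) (↑i) false
        = decide ((↑i : Int) ∈ acc ++ Q) := occOf_pyGetD n _ i hin
    have hcast1 : ((i : Int) + 1) = ((i + 1 : Nat) : Int) := by push_cast; ring
    have hri1 : PySem.List.pyGetD (occOf n (acc ++ Q)) ((↑i : Int) + 1) false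
        = decide (((i : Int) + 1) ∈ acc ++ Q) := by
      rw [hcast1, occOf_pyGetD n _ (i+1) hi1n]
    by_cases hrob : (↑i : Int) ∈ Q
    · -- a robot sits at position i
      obtain ⟨q0, Q', rfl⟩ : ∃ q0 Q', Q = q0 :: Q' := by
        cases Q with
        | nil => simp at hrob
        | cons a b => exact ⟨a, b, rfl⟩
      have hpw' := hpw
      rw [List.pairwise_append] at hpw'
      obtain ⟨hpacc, hpq, hcross⟩ := hpw'
      rw [List.pairwise_cons] at hpq
      obtain ⟨hq0gt, hpQ'⟩ := hpq
      have hq0 : q0 = (↑i : Int) := by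
        rcases List.mem_cons.1 hrob with h | h
        · omega
        · exfalso
          have h1 := hq0gt _ h
          have h2 := (hQ q0 (List.mem_cons_self)).2
          push_cast at h2
          omega
      subst hq0
      have hQ'lt : ∀ q ∈ Q', q < (↑i : Int) := fun q hq => hq0gt q hq
      have hiQ' : (↑i : Int) ∉ Q' := fun h => absurd (hQ'lt _ h) (by omega)
      have hprev_iff : (((↑i : Int) + 1) ∈ acc) ↔ acc.getLastD N = (↑i : Int) + 1 := by
        apply mem_iff_getLastD acc hpacc _ N
        · intro a ha
          have := (hacc a ha).2.1
          push_cast at this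
          omega
        · omega
      have hmem1 : ((((↑i) : Int) + 1) ∈ acc ++ (↑i : Int) :: Q') ↔ acc.getLastD N = (↑i : Int) + 1 := by
        rw [List.mem_append, List.mem_cons]
        constructor
        · rintro (h | h | h)
          · exact hprev_iff.1 h
          · omega
          · exact absurd (hQ'lt _ h) (by omega)
        · intro h
          exact Or.inl (hprev_iff.2 h)
      have hjlt : i + 1 < M := by omega
      have hbelt : PySem.List.pyGetD (pvR hd dur) ((↑i : Int) + 1) 0
          = dur.getD ((hd + (i+1)) % M) 0 := by
        rw [hcast1, PySem.List.pyGetD_natCast]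
        have := read_belt hd (i+1) dur (by omega) (by omega)
        rw [hdl] at this
        exact this
      set jj := (hd + (i+1)) % M with hjjdef
      have hjjM : jj < M := Nat.mod_lt _ (by omega)
      have hjcast : PySem.Int.mod ((hd : Int) + ↑i + 1) (M : Int) = ((jj : Nat) : Int) := by
        have h2 : ((hd : Int) + ↑i + 1) = (hd : Int) + ((i + 1 : Nat) : Int) := by push_cast; ring
        rw [h2, pymod_add_nat hd (i+1) M]
      set v := dur.getD jj 0 with hv
      have hvget : dur[jj]'(by omega) = v := (List.getD_eq_getElem dur 0 (by omega)).symm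
      by_cases hmv : (↑i : Int) + 1 ≠ acc.getLastD N ∧ 0 < v
      · -- the robot moves to i+1
        have hnotmem : ((↑i : Int) + 1) ∉ acc := fun h => hmv.1 (hprev_iff.1 h).symm
        have hsetD : (dur.set jj (v - 1)).getD jj 0 = v - 1 := by
          rw [List.getD_eq_getElem _ _ (by simp; omega), List.getElem_set, if_pos rfl]
        have hcore : pvBCore N (M : Int) (hd : Int)
              (acc.filter (fun a => decide (a < N - 1)), acc.getLastD N, dur, z) (↑i)
            = ((acc ++ [(↑i : Int) + 1]).filter (fun a => decide (a < N - 1)),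
               (acc ++ [(↑i : Int) + 1]).getLastD N,
               dur.set jj (v - 1), if v - 1 = 0 then z + 1 else z) := by
          simp only [pvBCore, hjcast, PySem.List.pyGetD_natCast, PySem.List.pySetD_natCast]
          rw [if_pos hmv]
          rw [List.getLastD_concat, List.filter_append, List.filter_singleton, hsetD]
          by_cases hlt : ((↑i : Int) + 1) < N - 1 <;>
            simp [hlt, ← List.getD_eq_getElem?_getD, ← hv]
        have hstep : pvAInner (pvR hd dur, occOf n (acc ++ (↑i : Int) :: Q')) (↑i)
            = (pvR hd (dur.set jj (v - 1)), occOf n ((acc ++ [(↑i : Int) + 1]) ++ Q')) := by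
          simp only [pvAInner]
          rw [hri, hri1, hbelt]
          rw [if_pos (by
            simp only [Bool.and_eq_true, decide_eq_true_eq, Bool.not_eq_eq_eq_not, Bool.not_true]
            refine ⟨⟨by simp, ?_⟩, ?_⟩
            · simp only [decide_eq_false_iff_not]
              rw [hmem1]
              exact fun h => hmv.1 h.symm
            · exact hmv.2)]
          simp only [Prod.mk.injEq]
          refine ⟨?_, ?_⟩
          · rw [hcast1, PySem.List.pySetD_natCast]
            have hps := pvR_set hd (i+1) dur (v - 1) (by omega) (by omega)
            rw [hdl] at hps
            rw [← hjjdef] at hps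
            exact hps.symm
          · rw [PySem.List.pySetD_natCast, hcast1, PySem.List.pySetD_natCast]
            rw [occOf_set_false n _ i hin, occOf_set_true n _ (i+1) hi1n]
            apply occOf_congr
            intro y hy
            rw [← hcast1]
            simp only [List.mem_cons, List.mem_filter, List.mem_append,
              List.not_mem_nil, or_false, decide_eq_true_eq]
            constructor
            · rintro (h | ⟨(h | h | h), hne⟩)
              · exact Or.inl (Or.inr h)
              · exact Or.inl (Or.inl h)
              · exact absurd h hne
              · exact Or.inr h
            · rintro ((h | h) | h)
              · exact Or.inr ⟨Or.inl h, fun hc => hiacc (hc ▸ h)⟩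
              · exact Or.inl h
              · exact Or.inr ⟨Or.inr (Or.inr h), fun hc => hiQ' (hc ▸ h)⟩
        rw [hstep]
        simp only [List.foldl_cons, hcore]
        apply ih (by omega) (acc ++ [(↑i : Int) + 1]) Q' (dur.set jj (v - 1))
        · simp [hdl]
        · rw [List.append_assoc]
          rw [List.pairwise_append]
          refine ⟨hpacc, ?_, ?_⟩
          · rw [List.singleton_append, List.pairwise_cons]
            exact ⟨fun q hq => by have := hQ'lt q hq; omega, hpQ'⟩
          · intro a ha b hb
            rcases List.mem_cons.1 hb with rfl | hb
            · have h1 := (hacc a ha).2.1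
              push_cast at h1
              have : a ≠ (↑i : Int) + 1 := fun hc => hnotmem (hc ▸ ha)
              omega
            · have := hQ'lt b hb
              have h1 := (hacc a ha).2.1
              push_cast at h1
              omega
        · intro a ha
          rcases List.mem_append.1 ha with h | h
          · have := hacc a h
            push_cast at this ⊢
            exact ⟨this.1, by omega, this.2.2⟩
          · rw [List.mem_singleton] at h
            subst h
            push_cast
            constructor
            · omega
            · constructor <;> omega
        · intro q hq
          have h1 := hQ q (List.mem_cons_of_mem _ hq)
          have h2 := hQ'lt q hq
          push_cast at h1 ⊢
          exact ⟨h1.1, by omega⟩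
        · have hcz := countZero_set_int dur jj (v - 1) (by omega)
          rw [hvget] at hcz
          rw [hcz, hz]
          have hvpos : 0 < v := hmv.2
          split_ifs <;> omega
      · -- the robot stays at i (blocked or no durability)
        have hilt : (↑i : Int) < N - 1 := by omega
        have hcore : pvBCore N (M : Int) (hd : Int)
              (acc.filter (fun a => decide (a < N - 1)), acc.getLastD N, dur, z) (↑i)
            = ((acc ++ [(↑i : Int)]).filter (fun a => decide (a < N - 1)),
               (acc ++ [(↑i : Int)]).getLastD N, dur, z) := by
          simp only [pvBCore, hjcast, PySem.List.pyGetD_natCast]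
          rw [if_neg hmv]
          rw [List.getLastD_concat, List.filter_append, List.filter_singleton]
          simp [hilt]
        have hstep : pvAInner (pvR hd dur, occOf n (acc ++ (↑i : Int) :: Q')) (↑i)
            = (pvR hd dur, occOf n (acc ++ (↑i : Int) :: Q')) := by
          simp only [pvAInner]
          rw [hri, hri1, hbelt]
          rcases not_and_or.1 hmv with h | h
          · push_neg at h
            have hm : (((↑i) : Int) + 1) ∈ acc ++ (↑i : Int) :: Q' := hmem1.2 h.symm
            rw [if_neg (by simp [hm])]
          · rw [if_neg (by simp [h])]
        rw [hstep]
        simp only [List.foldl_cons, hcore]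
        rw [show acc ++ (↑i : Int) :: Q' = (acc ++ [(↑i : Int)]) ++ Q' from List.append_cons _ _ _]
        apply ih (by omega) (acc ++ [(↑i : Int)]) Q' dur z hdl
        · rw [List.append_assoc]
          rw [List.pairwise_append]
          refine ⟨hpacc, ?_, ?_⟩
          · rw [List.singleton_append, List.pairwise_cons]
            exact ⟨hQ'lt, hpQ'⟩
          · intro a ha b hb
            rcases List.mem_cons.1 hb with rfl | hb
            · have h1 := (hacc a ha).2.1
              push_cast at h1
              omega
            · have := hQ'lt b hb
              have h1 := (hacc a ha).2.1
              push_cast at h1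
              omega
        · intro a ha
          rcases List.mem_append.1 ha with h | h
          · have := hacc a h
            push_cast at this ⊢
            exact ⟨this.1, by omega, this.2.2⟩
          · rw [List.mem_singleton] at h
            subst h
            have h1 := (hQ (↑i : Int) (List.mem_cons_self)).1
            push_cast
            exact ⟨by omega, by omega, by omega⟩
        · intro q hq
          have h1 := hQ q (List.mem_cons_of_mem _ hq)
          have h2 := hQ'lt q hq
          push_cast at h1 ⊢
          exact ⟨h1.1, by omega⟩
        · exact hz
    · -- no robot at position i: the sweep step is a no-op
      have hstep : pvAInner (pvR hd dur, occOf n (acc ++ Q)) (↑i)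
          = (pvR hd dur, occOf n (acc ++ Q)) := by
        simp only [pvAInner]
        rw [hri]
        simp [List.mem_append, hiacc, hrob]
      rw [hstep]
      apply ih (by omega) acc Q dur z hdl hpw
      · intro a ha
        have := hacc a ha
        push_cast at this ⊢
        exact ⟨this.1, by omega, this.2.2⟩
      · intro q hq
        have h1 := hQ q hq
        have hne : q ≠ (↑i : Int) := fun he => hrob (he ▸ hq)
        push_cast at h1 ⊢
        exact ⟨h1.1, by omega⟩
      · exact hz

theorem stepAB (N : Int) (M n : Nat) (hM : 0 < M) (hn : (n : Int) = N) (hnM : n ≤ M)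
    (hN1 : 1 ≤ N) (hd : Nat) (hhd : hd < M) (R dur : List Int) (z : Int)
    (hdl : dur.length = M) (hRp : R.Pairwise (· > ·)) (hRb : ∀ p ∈ R, 0 ≤ p)
    (hz : z = (dur.count 0 : Int)) :
    pvAStep N (pvR hd dur) (occOf n R)
        = (pvR ((hd + (M-1)) % M) (pvBStep N (M:Int) (hd:Int) R dur z).2.2.1,
           occOf n (pvBStep N (M:Int) (hd:Int) R dur z).2.1)
    ∧ (pvBStep N (M:Int) (hd:Int) R dur z).1 = (((hd + (M-1)) % M : Nat) : Int)
    ∧ (pvBStep N (M:Int) (hd:Int) R dur z).2.1.Pairwise (· > ·)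
    ∧ (∀ p ∈ (pvBStep N (M:Int) (hd:Int) R dur z).2.1, 0 ≤ p)
    ∧ (pvBStep N (M:Int) (hd:Int) R dur z).2.2.1.length = M
    ∧ (pvBStep N (M:Int) (hd:Int) R dur z).2.2.2
        = ((pvBStep N (M:Int) (hd:Int) R dur z).2.2.1.count 0 : Int) := by
  have hn1 : 1 ≤ n := by omega
  set hd' := (hd + (M-1)) % M with hhd'def
  have hhd' : hd' < M := Nat.mod_lt _ hM
  have hdne : dur ≠ [] := by
    intro h; rw [h] at hdl; simp at hdl; omega
  set T := (R.map (· + 1)).filter (fun q => decide (q < N - 1)) with hTdef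
  have hhead : PySem.Int.mod ((hd:Int) - 1) (M:Int) = ((hd' : Nat) : Int) := pymod_sub_one hd M hM
  have hTb : ∀ q ∈ T, 1 ≤ q ∧ q ≤ ((n-1 : Nat) : Int) - 1 := by
    intro q hq
    rw [hTdef, List.mem_filter, List.mem_map] at hq
    obtain ⟨⟨p, hp, rfl⟩, hlt⟩ := hq
    have h0 := hRb p hp
    simp only [decide_eq_true_eq] at hlt
    have : ((n - 1 : Nat) : Int) = N - 1 := by omega
    omega
  have hTp : T.Pairwise (· > ·) :=
    List.Pairwise.sublist List.filter_sublist
      (List.pairwise_map.mpr (hRp.imp (fun h => by omega)))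
  -- the scan
  obtain ⟨acc', Hfold, Hmoved, Hprev, Hpw, Hbd, Hlen, Hz2⟩ :=
    scanAB N M n hM hn hnM hd' hhd' (n-1) (by omega) [] T dur z hdl (by simpa using hTp)
      (by simp) hTb hz
  simp only [List.nil_append, List.filter_nil, List.getLastD_nil] at Hfold Hmoved Hprev Hlen Hz2
  set sB := T.foldl (pvBCore N (M:Int) (hd':Int)) (([] : List Int), N, dur, z) with hsBdef
  have hfilt_acc' : acc'.filter (fun a => decide (a < (n:Int) - 1))
      = acc'.filter (fun a => decide (a < N - 1)) := by rw [hn]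
  -- B side in normal form
  have hBS : pvBStep N (M:Int) (hd:Int) R dur z
      = (if 0 < sB.2.2.1.getD hd' 0 then
          (((hd' : Nat) : Int), sB.1 ++ [0],
           sB.2.2.1.set hd' (sB.2.2.1.getD hd' 0 - 1),
           if (sB.2.2.1.set hd' (sB.2.2.1.getD hd' 0 - 1)).getD hd' 0 = 0 then sB.2.2.2 + 1
           else sB.2.2.2)
        else (((hd' : Nat) : Int), sB.1, sB.2.2.1, sB.2.2.2)) := by
    simp only [pvBStep, hhead, bridge N (M:Int) ((hd':Nat):Int) R, ← hTdef, ← hsBdef,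
      PySem.List.pyGetD_natCast, PySem.List.pySetD_natCast]
  -- A side in normal form
  have hread0 : PySem.List.pyGetD (pvR hd' sB.2.2.1) 0 0 = sB.2.2.1.getD hd' 0 := by
    rw [PySem.List.pyGetD_zero]
    have := read_belt hd' 0 sB.2.2.1 (by omega) (by omega)
    rw [Hlen] at this
    rw [this, Nat.add_zero, Nat.mod_eq_of_lt hhd']
  have hAS : pvAStep N (pvR hd dur) (occOf n R)
      = (if 0 < sB.2.2.1.getD hd' 0 then
          (pvR hd' (sB.2.2.1.set hd' (sB.2.2.1.getD hd' 0 - 1)), occOf n ((0 : Int) :: sB.1))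
        else (pvR hd' sB.2.2.1, occOf n sB.1)) := by
    simp only [pvAStep]
    rw [rot_cons hd dur 0 hdne (by omega), PySem.List.slice_to_neg_one]
    rw [hdl, ← hhd'def]
    rw [occOf_rot n (by omega) R (fun p hp => hRb p hp)]
    rw [occOf_clear n (by omega) (R.map (· + 1))]
    rw [show (R.map (· + 1)).filter (fun a => decide (a < (n:Int) - 1)) = T from by
      rw [hTdef, hn]]
    rw [df_pyRange N hN1, show (N-1).toNat = n - 1 from by omega]
    rw [Hfold]
    dsimp only
    rw [occOf_clear n (by omega) acc', hfilt_acc', ← Hmoved]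
    rw [hread0]
    split_ifs with hpos
    · simp only [Prod.mk.injEq]
      constructor
      · rw [PySem.List.pySetD_of_nonneg _ _ (by norm_num : (0:Int) ≤ (0:Int))]
        simp only [Int.toNat_zero]
        have hps := pvR_set hd' 0 sB.2.2.1 (sB.2.2.1.getD hd' 0 - 1) (by omega) (by omega)
        rw [Hlen] at hps
        simp only [Nat.add_zero, Nat.mod_eq_of_lt hhd'] at hps
        exact hps.symm
      · rw [PySem.List.pySetD_of_nonneg _ _ (by norm_num : (0:Int) ≤ (0:Int))]
        simp only [Int.toNat_zero]
        rw [occOf_set_true n sB.1 0 (by omega)]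
        norm_num
    · rfl
  have hmoved_pos : ∀ p ∈ sB.1, 1 ≤ p := by
    intro p hp
    rw [Hmoved, List.mem_filter] at hp
    exact (Hbd p hp.1).1
  have hmoved_pw : sB.1.Pairwise (· > ·) :=
    Hmoved ▸ List.Pairwise.sublist List.filter_sublist Hpw
  rw [hAS, hBS]
  by_cases hpos : 0 < sB.2.2.1.getD hd' 0
  · rw [if_pos hpos, if_pos hpos]
    have hvget : sB.2.2.1[hd']'(by omega) = sB.2.2.1.getD hd' 0 :=
      (List.getD_eq_getElem sB.2.2.1 0 (by omega)).symm
    refine ⟨?_, ?_, ?_, ?_, ?_, ?_⟩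
    · simp only [Prod.mk.injEq, true_and]
      apply occOf_congr
      intro y hy
      simp [List.mem_cons, List.mem_append, or_comm]
    · rfl
    · rw [List.pairwise_append]
      refine ⟨hmoved_pw, List.pairwise_singleton _ _, ?_⟩
      intro a ha b hb
      rw [List.mem_singleton] at hb
      subst hb
      have := hmoved_pos a ha
      omega
    · intro p hp
      rcases List.mem_append.1 hp with h | h
      · have := hmoved_pos p h; omega
      · rw [List.mem_singleton] at h; omega
    · simp [Hlen]
    · dsimp only
      rw [List.getD_eq_getElem _ _ (by simp; omega), List.getElem_set, if_pos rfl]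
      have hcz := countZero_set_int sB.2.2.1 hd' (sB.2.2.1.getD hd' 0 - 1) (by omega)
      rw [hvget] at hcz
      rw [hcz, ← Hz2]
      split_ifs <;> omega
  · rw [if_neg hpos, if_neg hpos]
    exact ⟨rfl, rfl, hmoved_pw, fun p hp => by have := hmoved_pos p hp; omega, Hlen, Hz2⟩

theorem loopAB (N K : Int) (M n : Nat) (hM : 0 < M) (hn : (n : Int) = N) (hnM : n ≤ M)
    (hN1 : 1 ≤ N) :
    ∀ (fuel : Nat) (step : Int) (hd : Nat), hd < M →
    ∀ (R dur : List Int) (z : Int),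
      dur.length = M → R.Pairwise (· > ·) → (∀ p ∈ R, 0 ≤ p) →
      z = (dur.count 0 : Int) →
      pvALoop N K fuel step (pvR hd dur) (occOf n R)
        = pvBLoop N K (M:Int) fuel step (hd:Int) R dur z := by
  intro fuel
  induction fuel with
  | zero => intros; rfl
  | succ fuel ih =>
    intro step hd hhd R dur z hdl hRp hRb hz
    obtain ⟨HA, Hh, HP, Hb, Hl, Hz⟩ := stepAB N M n hM hn hnM hN1 hd hhd R dur z hdl hRp hRb hz
    simp only [pvALoop, pvBLoop]
    rw [HA]
    dsimp only
    rw [count_pvR, ← Hz]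
    split_ifs with hc
    · rfl
    · rw [Hh]
      exact ih (step+1) ((hd + (M-1)) % M) (Nat.mod_lt _ hM)
        (pvBStep N (M:Int) (hd:Int) R dur z).2.1
        (pvBStep N (M:Int) (hd:Int) R dur z).2.2.1
        (pvBStep N (M:Int) (hd:Int) R dur z).2.2.2
        Hl HP Hb Hz

-- ===== degenerate branch: K already satisfied =====

theorem allfalse_pyGetD (xs : List Bool) (hall : ∀ b ∈ xs, b = false) (i : Int) :
    PySem.List.pyGetD xs i false = false := by
  unfold PySem.List.pyGetD
  cases hg : PySem.List.pyGet? xs i with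
  | none => rfl
  | some b =>
    simp only [Option.getD_some]
    exact hall b (PySem.List.mem_of_pyGet?_eq_some xs hg)

theorem fold_nomove (L : List Int) : ∀ (A : List Int) (robot : List Bool),
    (∀ b ∈ robot, b = false) → L.foldl pvAInner (A, robot) = (A, robot) := by
  induction L with
  | nil => intros; rfl
  | cons i L ih =>
    intro A robot hall
    have hstep : pvAInner (A, robot) i = (A, robot) := by
      simp only [pvAInner]
      rw [show PySem.List.pyGetD (A, robot).2 i false = false from allfalse_pyGetD robot hall i]
      simp
    rw [List.foldl_cons, hstep]
    exact ih A robot hall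

theorem count_last_decomp (A : List Int) (hA : A ≠ []) :
    A.count 0 = A.dropLast.count 0 + (if A.getLast hA = 0 then 1 else 0) := by
  conv_lhs => rw [← List.dropLast_append_getLast hA]
  rw [List.count_append]
  congr 1
  simp [List.count_cons]

theorem aStep_count_ge (N : Int) (A : List Int) (hA : A ≠ []) (robot : List Bool)
    (hall : ∀ b ∈ robot, b = false) :
    (A.count 0 : Int) ≤ ((pvAStep N A robot).1.count 0 : Int) := by
  simp only [pvAStep]
  rw [PySem.List.pyGetD_neg_one _ 0 hA, PySem.List.slice_to_neg_one,
    PySem.List.slice_to_neg_one]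
  have hall1 : ∀ b ∈ (false :: robot.dropLast), b = false := by
    intro b hb
    rcases List.mem_cons.1 hb with rfl | hb
    · rfl
    · exact hall b ((List.dropLast_sublist robot).mem hb)
  have hgd : PySem.List.pyGetD (false :: robot.dropLast) (-1) false = false :=
    allfalse_pyGetD _ hall1 (-1)
  rw [hgd]
  simp only [Bool.false_eq_true, if_false]
  rw [fold_nomove _ _ _ hall1]
  dsimp only
  rw [hgd]
  simp only [Bool.false_eq_true, if_false]
  rw [PySem.List.pyGetD_zero_cons]
  have hdecomp := count_last_decomp A hA
  split_ifs with hpos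
  · dsimp only
    rw [PySem.List.pySetD_of_nonneg _ _ (by norm_num : (0:Int) ≤ (0:Int))]
    simp only [Int.toNat_zero, List.set_cons_zero]
    rw [hdecomp, if_neg (by omega : ¬A.getLast hA = 0)]
    simp only [List.count_cons, beq_iff_eq, Nat.add_zero]
    push_cast
    split_ifs <;> omega
  · dsimp only
    rw [hdecomp]
    simp only [List.count_cons, beq_iff_eq]
    push_cast
    split_ifs <;> omega

theorem aloop_one (N K : Int) (fuel : Nat) (step : Int) (A : List Int) (hA : A ≠ [])
    (robot : List Bool) (hall : ∀ b ∈ robot, b = false) (hK : K ≤ (A.count 0 : Int)) :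
    pvALoop N K (fuel+1) step A robot = step + 1 := by
  simp only [pvALoop]
  rw [if_pos (le_trans hK (aStep_count_ge N A hA robot hall))]

theorem bCore_z_mono (N M h : Int) (s : List Int × Int × List Int × Int) (q : Int) :
    s.2.2.2 ≤ (pvBCore N M h s q).2.2.2 := by
  simp only [pvBCore]
  split_ifs <;> simp only <;> omega

theorem bInner_z_mono (N M h : Int) (s : List Int × Int × List Int × Int) (p : Int) :
    s.2.2.2 ≤ (pvBInner N M h s p).2.2.2 := by
  simp only [pvBInner]
  split_ifs
  · omega
  · exact bCore_z_mono N M h s (p+1)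

theorem bfold_z_mono (N M h : Int) (L : List Int) : ∀ (s : List Int × Int × List Int × Int),
    s.2.2.2 ≤ (L.foldl (pvBInner N M h) s).2.2.2 := by
  induction L with
  | nil => intro s; exact le_refl _
  | cons i L ih =>
    intro s
    exact le_trans (bInner_z_mono N M h s i) (ih _)

theorem bStep_z_mono (N M h : Int) (R dur : List Int) (z : Int) :
    z ≤ (pvBStep N M h R dur z).2.2.2 := by
  simp only [pvBStep]
  have := bfold_z_mono N M (PySem.Int.mod (h - 1) M) R
    (([] : List Int), N, dur, z)
  dsimp only at this ⊢
  split_ifs <;> dsimp only <;> omega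

theorem bloop_one (N K M : Int) (fuel : Nat) (step head : Int) (R dur : List Int)
    (z : Int) (hK : K ≤ z) :
    pvBLoop N K M (fuel+1) step head R dur z = step + 1 := by
  simp only [pvBLoop]
  rw [if_pos (le_trans hK (bStep_z_mono N M head R dur z))]

theorem mainAB (N K : Int) (A : List Int) (hA : A ≠ [])
    (hcase : K ≤ (A.count 0 : Int) ∨
      (1 ≤ N ∧ N ≤ (A.length : Int) ∧
        K ≤ (A.count 0 : Int) + (A.countP (fun x => decide (0 < x)) : Int))) :
    pvALoop N K (pvFuel A) 0 A (List.replicate N.toNat false)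
      = pvBLoop N K (A.length : Int) (pvFuel A) 0 0 [] A (A.count 0 : Int) := by
  have hM : 0 < A.length := List.length_pos_iff.mpr hA
  by_cases hNrange : 1 ≤ N ∧ N ≤ (A.length : Int)
  · have h0 : pvR 0 A = A := by simp [pvR]
    have hrep : occOf N.toNat ([] : List Int) = List.replicate N.toNat false := occOf_nil _
    have H := loopAB N K A.length N.toNat hM (by omega) (by omega) hNrange.1 (pvFuel A) 0 0 hM
      [] A (A.count 0 : Int) rfl (by simp) (by simp) rfl
    rw [h0, hrep] at H
    simpa using H
  · have hK : K ≤ (A.count 0 : Int) := by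
      rcases hcase with h | h
      · exact h
      · exact absurd ⟨h.1, h.2.1⟩ hNrange
    obtain ⟨f, hf⟩ : ∃ f, pvFuel A = f + 1 := ⟨pvFuel A - 1, by unfold pvFuel; omega⟩
    rw [hf]
    rw [aloop_one N K f 0 A hA _ (fun b hb => List.eq_of_mem_replicate hb) hK]
    rw [bloop_one N K (A.length : Int) f 0 0 [] A _ hK]

-- ===== VERDICT (by name: the statement is the Claim_ definition above) =====
theorem conveyor_belt_robot_spec : Claim_equal_conveyor_belt_robot := by
  intro N K A _ hPre
  obtain ⟨hA, hcase⟩ := hPre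
  unfold Spec_conveyor_belt_robot conveyor_belt_robot conveyor_belt_robot_alt
  exact mainAB N K A hA hcase
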